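-- pv_equiv track=rewrite | github.com/dcbriccetti/advent-of-code-2023-python | src/1.py | extract_digit
-- ===== SOURCE A (Python) =====
-- from typing import Optional
--
-- def extract_digit(line: str, words: list[str]):
--     # Variable to store the found digit, initially None
--     found_digit: Optional[int] = None
--     # Continue until a digit is found or the line is empty
--     while not found_digit and line:
--         if line[0].isdigit():
--             # If the first character is a digit, use it
--             found_digit = int(line[0])
--             # Remove the first character from the line
--             line = line[1:]
--         else:
--             # Loop through the list of words
--             for i, word in enumerate(words, 1):
--                 if line.startswith(word):
--                     # If the line starts with a word from the list, use its index as the digit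
--                     found_digit = i
--                     # Remove the found word from the line
--                     line = line[len(word):]
--                     break
--             # If no digit is found, remove the first character and continue
--             if not found_digit:
--                 line = line[1:]
--     return found_digit
-- ===== SOURCE B (Python) =====
-- def extract_digit(line, words):
--     # Collect (position, priority, value) candidates: the first digit of the
--     # line, and each word's first occurrence (found with str.find); the
--     # candidate at the smallest position wins, digits before words, earlier
--     # words before later ones.
--     candidates = []
--     for i, ch in enumerate(line):
--         if ch.isdigit():
--             candidates.append((i, 0, int(ch)))
--             break
--     for rank, word in enumerate(words, 1):
--         pos = line.find(word)
--         if pos != -1: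
--             candidates.append((pos, rank, rank))
--     return min(candidates)[2] if candidates else None
-- ===== Notes on version B (the rewrite author's own statement) =====
-- stated objective: alternative
-- what changed: A scans the line left-to-right, re-slicing it and re-testing every word at each position with a falsy found_digit accumulator; B instead builds an index of candidates (the first digit's position, and one str.find first-occurrence per word) and returns the value at the lexicographically smallest (position, priority) candidate; Pre_ excludes only the empty line with an empty word in the list, where A's None and B's match-at-0 are both defensible readings of ''.startswith('').
-- intended difference: On lines whose first digit-or-word match is a '0' followed by a later match, A's falsy `not found_digit` test silently skips the 0 and returns the later match's value, while B returns 0 — the line's first digit, which is what the function is for. — e.g. on extract_digit("01", []): A returns some 1, B returns some 0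
-- outside the precondition, e.g. on extract_digit('', ['']): A returns None, B returns 1
import Mathlib
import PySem

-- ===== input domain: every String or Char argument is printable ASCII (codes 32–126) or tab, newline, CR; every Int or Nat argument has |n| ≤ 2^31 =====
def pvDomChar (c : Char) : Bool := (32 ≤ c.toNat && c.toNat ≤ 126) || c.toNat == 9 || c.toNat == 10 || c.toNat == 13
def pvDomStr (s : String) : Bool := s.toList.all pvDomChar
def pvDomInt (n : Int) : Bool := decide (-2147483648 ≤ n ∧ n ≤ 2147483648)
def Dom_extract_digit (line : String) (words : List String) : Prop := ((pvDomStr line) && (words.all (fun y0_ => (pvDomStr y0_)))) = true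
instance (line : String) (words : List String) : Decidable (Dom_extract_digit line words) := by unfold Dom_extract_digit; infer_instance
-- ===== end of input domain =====

-- B replaces A's destructive left-to-right scan (re-slicing the line, re-testing every
-- word at each position, with a falsy-0 accumulator) by candidate building: the first
-- digit's position and each word's first occurrence (one str.find per word) are collected
-- and the lexicographically smallest (position, priority, value) wins. On lines whose
-- first digit-or-word hit is a '0' that A's falsy test skips, B intentionally returns 0
-- (see D_ below). Objective: alternative decomposition.

-- ===== PORT A =====
-- `not found_digit` — Python falsiness of Optional[int]: None and 0 are falsy
def truthyOpt : Option Int → Bool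
  | none => false
  | some n => n != 0

-- `for i, word in enumerate(words, 1): if line.startswith(word): … break`
-- first word that is a prefix of line, with its 0-based position (A uses i = pos + 1)
def findWordA (line : List Char) : List (List Char) → Option (Nat × List Char)
  | [] => none
  | w :: ws =>
    if PySem.Chars.startswith line w then some (0, w)
    else (findWordA line ws).map (fun p => (p.1 + 1, p.2))

-- the while loop; `line[0].isdigit()`, `int(line[0])`, `line[1:]`, `line[len(word):]`
def loopA (words : List (List Char)) (found : Option Int) (line : List Char) : Option Int :=
  match line with
  | [] => found
  | c :: rest =>
    if truthyOpt found then found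
    else if PySem.Chars.isdigit c then loopA words (some ((c.toNat : Int) - 48)) rest
    else
      match findWordA (c :: rest) words with
      | some (i, w) => loopA words (some ((i : Int) + 1)) ((c :: rest).drop w.length)
      | none => loopA words found rest
termination_by line.length * 2 + (if truthyOpt found then 0 else 1)
decreasing_by
  · simp_all only [List.length_cons, Bool.not_eq_true]
    split <;> simp_all <;> omega
  · have h1 : truthyOpt (some ((i : Int) + 1)) = true := by
      simp [truthyOpt]; omega
    simp_all only [List.length_cons, List.length_drop, Bool.not_eq_true]
    simp <;> omega
  · simp_all only [List.length_cons, Bool.not_eq_true]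
    omega

def extract_digit (line : String) (words : List String) : Option Int :=
  loopA (words.map String.toList) none line.toList

-- ===== PORT B =====
-- `for i, ch in enumerate(line): if ch.isdigit(): append((i, 0, int(ch))); break`
def digitCandB : List Char → Int → Option (Int × Int × Int)
  | [], _ => none
  | c :: rest, i =>
    if PySem.Chars.isdigit c then some (i, 0, (c.toNat : Int) - 48)
    else digitCandB rest (i + 1)

-- `for rank, word in enumerate(words, 1): pos = line.find(word); if pos != -1: append((pos, rank, rank))`
def wordCandsB (l : List Char) : List (List Char) → Int → List (Int × Int × Int)
  | [], _ => []
  | w :: ws, r =>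
    (if PySem.Chars.find l w ≠ -1 then [(PySem.Chars.find l w, r, r)] else [])
      ++ wordCandsB l ws (r + 1)

-- Python `<` on int-triples (lexicographic), and `min` keeping the first minimum
def lexLt (a b : Int × Int × Int) : Bool :=
  a.1 < b.1 || (a.1 == b.1 && (a.2.1 < b.2.1 || (a.2.1 == b.2.1 && a.2.2 < b.2.2)))

def minf (m x : Int × Int × Int) : Int × Int × Int := if lexLt x m then x else m

def extract_digit_alt (line : String) (words : List String) : Option Int :=
  let l := line.toList
  let cands :=
    (match digitCandB l 0 with | some c => [c] | none => [])
      ++ wordCandsB l (words.map String.toList) 1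
  match cands with
  | [] => none
  | c :: cs => some ((cs.foldl minf c).2.2)

-- ===== PRECONDITION & SPEC =====
-- Pre_ excludes only the corner of an empty word searched in an empty line, where A's
-- None and B's match-at-position-0 are both defensible readings of ''.startswith('').
def Pre_extract_digit (line : String) (words : List String) : Prop :=
  ¬ (line = "" ∧ "" ∈ words)
instance (line : String) (words : List String) : Decidable (Pre_extract_digit line words) := by
  unfold Pre_extract_digit; infer_instance
def pvWitness_extract_digit : String × List String := ("a1", ["one"])

-- position with a digit or a word match (what stops A's scan, or B's candidate)
def pvCand (ws : List String) (s : List Char) : Bool :=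
  PySem.Chars.isdigit (s.headD ' ') || ws.any (fun w => PySem.Chars.startswith s w.toList)

-- On lines whose first digit-or-word match is a digit '0' that is followed by a later
-- match, A's falsy `not found_digit` test silently skips the 0 and returns the later
-- match's value, while B returns 0 — the first digit of the line, which is what the
-- function is for.
def D_extract_digit (line : String) (words : List String) : Prop :=
  ∃ p < line.toList.length, ∃ q < line.toList.length, p < q ∧
    (line.toList.drop p).head? = some '0' ∧
    (∀ r < p, pvCand words (line.toList.drop r) = false) ∧
    pvCand words (line.toList.drop q) = true ∧ (line.toList.drop q).head? ≠ some '0'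
instance (line : String) (words : List String) : Decidable (D_extract_digit line words) := by
  unfold D_extract_digit; infer_instance

def Spec_extract_digit (line : String) (words : List String) (out : Option Int) : Prop :=
  ¬ D_extract_digit line words → out = extract_digit_alt line words
instance (line : String) (words : List String) (out : Option Int) : Decidable (Spec_extract_digit line words out) := by
  unfold Spec_extract_digit; infer_instance

def pvDiffWitness_extract_digit : String × List String := ("01", [])
def pvDiffWitnessOut_extract_digit : (Option Int) × (Option Int) := (some 1, some 0)

-- ===== CLAIM (what is proved, stated in full; the proofs are below) =====
def Claim_unchanged_extract_digit : Prop := ∀ (line : String) (words : List String), Dom_extract_digit line words → Pre_extract_digit line words → Spec_extract_digit line words (extract_digit line words)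
def Claim_changed_extract_digit : Prop := Dom_extract_digit (pvDiffWitness_extract_digit.1) (pvDiffWitness_extract_digit.2) ∧ Pre_extract_digit (pvDiffWitness_extract_digit.1) (pvDiffWitness_extract_digit.2) ∧ D_extract_digit (pvDiffWitness_extract_digit.1) (pvDiffWitness_extract_digit.2) ∧ extract_digit (pvDiffWitness_extract_digit.1) (pvDiffWitness_extract_digit.2) = pvDiffWitnessOut_extract_digit.1 ∧ extract_digit_alt (pvDiffWitness_extract_digit.1) (pvDiffWitness_extract_digit.2) = pvDiffWitnessOut_extract_digit.2 ∧ pvDiffWitnessOut_extract_digit.1 ≠ pvDiffWitnessOut_extract_digit.2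
def Claim_exact_extract_digit : Prop := ∀ (line : String) (words : List String), Dom_extract_digit line words → Pre_extract_digit line words → D_extract_digit line words → extract_digit line words ≠ extract_digit_alt line words

-- ===== LEMMAS AND PROOFS =====

-- proof-side views of D_'s positions
def pvHit (ws : List (List Char)) (s : List Char) : Bool :=
  match s with
  | [] => false
  | c :: _ => if PySem.Chars.isdigit c then c != '0' else ws.any (fun w => PySem.Chars.startswith s w)

def pvFree (ws : List (List Char)) (s : List Char) : Bool :=
  match s with
  | [] => true
  | c :: _ => !PySem.Chars.isdigit c && !ws.any (fun w => PySem.Chars.startswith s w)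

theorem cand_free (words : List String) (c : Char) (r : List Char) :
    pvCand words (c :: r) = false ↔ pvFree (words.map String.toList) (c :: r) = true := by
  simp [pvCand, pvFree, List.any_map, Function.comp]

theorem cand_hit (words : List String) (c : Char) (r : List Char) :
    (pvCand words (c :: r) = true ∧ (c :: r).head? ≠ some '0') ↔
      pvHit (words.map String.toList) (c :: r) = true := by
  by_cases hd : PySem.Chars.isdigit c
  · have h0 : ((c :: r).head? ≠ some '0') ↔ (c != '0') = true := by simp
    simp [pvCand, pvHit, hd, h0]
  · have h0 : (c :: r).head? ≠ some '0' := by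
      simp only [List.head?_cons, ne_eq, Option.some_inj]
      intro h
      rw [h] at hd
      exact hd (by decide)
    simp [pvCand, pvHit, hd, List.any_map, Function.comp]
    exact fun x _ _ => by simpa using h0


theorem chDigit (c : Char) : PySem.Chars.isdigit c = true ↔ (48 ≤ c.toNat ∧ c.toNat ≤ 57) := by
  simp only [PySem.Chars.isdigit, Bool.and_eq_true, decide_eq_true_eq, Char.le_def,
    UInt32.le_iff_toNat_le, Char.toNat, show '0'.val.toNat = 48 from rfl,
    show '9'.val.toNat = 57 from rfl]

theorem chZero (c : Char) : c = '0' ↔ c.toNat = 48 := by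
  rw [Char.ext_iff, ← UInt32.toNat_inj]
  simp only [Char.toNat, show '0'.val.toNat = 48 from rfl]

-- proof-side min machinery
def minOpt : Option (Int × Int × Int) → Option (Int × Int × Int) → Option (Int × Int × Int)
  | none, b => b
  | some x, none => some x
  | some x, some y => some (minf x y)

def shiftO (o : Option (Int × Int × Int)) : Option (Int × Int × Int) :=
  o.map (fun b => (b.1 + 1, b.2))

def omin : List (Int × Int × Int) → Option (Int × Int × Int)
  | [] => none
  | c :: cs => some (cs.foldl minf c)

theorem minf_assoc (x y z : Int × Int × Int) : minf (minf x y) z = minf x (minf y z) := by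
  obtain ⟨a1, a2, a3⟩ := x; obtain ⟨b1, b2, b3⟩ := y; obtain ⟨c1, c2, c3⟩ := z
  simp only [minf, lexLt, Bool.or_eq_true, Bool.and_eq_true, decide_eq_true_eq, beq_iff_eq] <;>
    split_ifs <;> first | rfl | (exfalso; omega) | (simp_all; omega)

theorem minOpt_assoc (a b c : Option (Int × Int × Int)) :
    minOpt (minOpt a b) c = minOpt a (minOpt b c) := by
  rcases a with _ | x <;> rcases b with _ | y <;> rcases c with _ | z <;>
    simp only [minOpt] <;> rw [minf_assoc]

theorem minOpt_shift (a b : Option (Int × Int × Int)) :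
    minOpt (shiftO a) (shiftO b) = shiftO (minOpt a b) := by
  rcases a with _ | x <;> rcases b with _ | y <;>
    simp only [minOpt, shiftO, Option.map_none, Option.map_some]
  obtain ⟨x1, x2, x3⟩ := x; obtain ⟨y1, y2, y3⟩ := y
  simp only [minf, lexLt] <;> split_ifs <;> simp_all <;> omega

theorem foldl_minf (xs : List (Int × Int × Int)) :
    ∀ x, some (List.foldl minf x xs) = minOpt (some x) (omin xs) := by
  induction xs with
  | nil => intro x; rfl
  | cons y ys ih =>
    intro x
    rw [List.foldl_cons, ih (minf x y),
      show omin (y :: ys) = minOpt (some y) (omin ys) from (ih y).symm ▸ rfl]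
    · rw [show (some (minf x y)) = minOpt (some x) (some y) from rfl, minOpt_assoc]

theorem omin_append (xs ys : List (Int × Int × Int)) :
    omin (xs ++ ys) = minOpt (omin xs) (omin ys) := by
  cases xs with
  | nil => rfl
  | cons x xs =>
    simp only [omin, List.cons_append, List.foldl_append]
    rw [foldl_minf ys (List.foldl minf x xs)]
    rfl

-- B-side structured view
def candW (l w : List Char) (r : Int) : Option (Int × Int × Int) :=
  if PySem.Chars.find l w = -1 then none else some (PySem.Chars.find l w, r, r)

def bestW (l : List Char) : List (List Char) → Int → Option (Int × Int × Int)
  | [], _ => none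
  | w :: ws, r => minOpt (candW l w r) (bestW l ws (r + 1))

theorem omin_wordCandsB (l : List Char) :
    ∀ (ws : List (List Char)) (r : Int), omin (wordCandsB l ws r) = bestW l ws r := by
  intro ws
  induction ws with
  | nil => intro r; rfl
  | cons w ws ih =>
    intro r
    rw [wordCandsB, omin_append, ih (r + 1), bestW]
    congr 1
    by_cases h : PySem.Chars.find l w = -1 <;> simp [candW, h, omin]

theorem digitCandB_shift (l : List Char) :
    ∀ i : Int, digitCandB l (i + 1) = shiftO (digitCandB l i) := by
  induction l with
  | nil => intro i; rfl
  | cons c rest ih =>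
    intro i
    by_cases h : PySem.Chars.isdigit c
    · simp [digitCandB, h, shiftO]
    · simp only [digitCandB, h, Bool.false_eq_true, if_false]
      exact ih (i + 1)

theorem digitCandB_pos (l : List Char) :
    ∀ (i : Int) (b : Int × Int × Int), digitCandB l i = some b → i ≤ b.1 ∧ b.2.1 = 0 := by
  induction l with
  | nil => intro i b h; simp [digitCandB] at h
  | cons c rest ih =>
    intro i b h
    simp only [digitCandB] at h
    split_ifs at h with hd
    · injection h with h'; rw [← h']; simp
    · have := ih (i + 1) b h; omega

theorem candW_pos (l w : List Char) (r : Int) (b : Int × Int × Int)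
    (h : candW l w r = some b) : 0 ≤ b.1 ∧ b.2.1 = r := by
  have hge := PySem.Chars.neg_one_le_find l w
  unfold candW at h
  split_ifs at h with h1
  injection h with h2
  rw [← h2]
  constructor
  · show (0 : Int) ≤ PySem.Chars.find l w; omega
  · rfl

theorem bestW_pos (l : List Char) :
    ∀ (ws : List (List Char)) (r : Int) (b : Int × Int × Int),
      bestW l ws r = some b → 0 ≤ b.1 ∧ r ≤ b.2.1 := by
  intro ws
  induction ws with
  | nil => intro r b h; simp [bestW] at h
  | cons w ws ih =>
    intro r b h
    simp only [bestW] at h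
    cases hc : candW l w r with
    | none =>
      rw [hc] at h
      have := ih (r + 1) b h
      omega
    | some x =>
      have hx := candW_pos l w r x hc
      rw [hc] at h
      cases hb : bestW l ws (r + 1) with
      | none =>
        rw [hb] at h
        simp only [minOpt] at h
        injection h with h'
        rw [← h']; omega
      | some y =>
        have hy := ih (r + 1) y hb
        rw [hb] at h
        simp only [minOpt, minf] at h
        split_ifs at h <;> (injection h with h'; rw [← h']; omega)

theorem find_cons (c : Char) (rest w : List Char) :
    PySem.Chars.find (c :: rest) w =
      if w <+: (c :: rest) then 0
      else if PySem.Chars.find rest w = -1 then -1 else PySem.Chars.find rest w + 1 := by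
  by_cases hp : w <+: (c :: rest)
  · rw [if_pos hp]
    have hge : 0 ≤ PySem.Chars.find (c :: rest) w := by
      have h1 := PySem.Chars.neg_one_le_find (c :: rest) w
      have h2 : ¬ PySem.Chars.find (c :: rest) w = -1 := by
        rw [PySem.Chars.find_eq_neg_one_iff]; exact fun h => h hp.isInfix
      omega
    obtain ⟨hpre, hmin⟩ := PySem.Chars.find_spec hge
    by_contra hne
    have hpos : 0 < (PySem.Chars.find (c :: rest) w).toNat := by omega
    exact hmin 0 hpos (by simpa using hp)
  · rw [if_neg hp]
    by_cases h1 : PySem.Chars.find rest w = -1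
    · rw [if_pos h1, PySem.Chars.find_eq_neg_one_iff]
      rw [PySem.Chars.find_eq_neg_one_iff] at h1
      intro hinf
      rcases List.infix_cons_iff.mp hinf with h | h
      · exact hp h
      · exact h1 h
    · rw [if_neg h1]
      have hge : 0 ≤ PySem.Chars.find rest w := by
        have := PySem.Chars.neg_one_le_find rest w; omega
      obtain ⟨hpre, hmin⟩ := PySem.Chars.find_spec hge
      have hinf : w <:+: (c :: rest) :=
        List.infix_cons_iff.mpr (Or.inr (hpre.isInfix.trans (List.drop_suffix _ _).isInfix))
      have hge2 : 0 ≤ PySem.Chars.find (c :: rest) w := by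
        have h2 : ¬ PySem.Chars.find (c :: rest) w = -1 := by
          rw [PySem.Chars.find_eq_neg_one_iff]; exact fun h => h hinf
        have := PySem.Chars.neg_one_le_find (c :: rest) w; omega
      obtain ⟨hpre2, hmin2⟩ := PySem.Chars.find_spec hge2
      have hne0 : (PySem.Chars.find (c :: rest) w).toNat ≠ 0 := by
        intro h0
        rw [h0] at hpre2; exact hp (by simpa using hpre2)
      obtain ⟨j, hj⟩ : ∃ j, (PySem.Chars.find (c :: rest) w).toNat = j + 1 :=
        ⟨_, (Nat.succ_pred_eq_of_pos (Nat.pos_of_ne_zero hne0)).symm⟩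
      have hjk : ¬ j < (PySem.Chars.find rest w).toNat := fun hlt =>
        hmin j hlt (by rw [← List.drop_succ_cons, ← hj]; exact hpre2)
      have hkj : ¬ (PySem.Chars.find rest w).toNat + 1 < j + 1 := fun hlt =>
        hmin2 ((PySem.Chars.find rest w).toNat + 1) (by omega)
          (by rw [List.drop_succ_cons]; exact hpre)
      omega

theorem candW_cons (c : Char) (rest w : List Char) (r : Int) :
    candW (c :: rest) w r =
      if PySem.Chars.startswith (c :: rest) w then some (0, r, r)
      else shiftO (candW rest w r) := by
  have hge := PySem.Chars.neg_one_le_find rest w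
  by_cases hp : w <+: (c :: rest)
  · have hs : PySem.Chars.startswith (c :: rest) w = true := (PySem.Chars.startswith_iff _ _).mpr hp
    rw [if_pos hs]
    unfold candW
    rw [find_cons, if_pos hp]
    norm_num
  · have hs : PySem.Chars.startswith (c :: rest) w = false := by
      rw [Bool.eq_false_iff]
      exact fun hsw => hp ((PySem.Chars.startswith_iff _ _).mp hsw)
    simp only [hs, Bool.false_eq_true, if_false]
    unfold candW
    rw [find_cons, if_neg hp]
    by_cases h1 : PySem.Chars.find rest w = -1
    · simp [h1, shiftO]
    · rw [if_neg h1, if_neg h1, if_neg (show ¬ PySem.Chars.find rest w + 1 = -1 by omega)]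
      simp [shiftO]

theorem findWordA_none_iff (s : List Char) :
    ∀ ws : List (List Char),
      findWordA s ws = none ↔ ∀ w ∈ ws, PySem.Chars.startswith s w = false := by
  intro ws
  induction ws with
  | nil => simp [findWordA]
  | cons w ws ih =>
    simp only [findWordA, List.mem_cons]
    by_cases h : PySem.Chars.startswith s w
    · simp [h]
    · simp only [h, Bool.false_eq_true, if_false, Option.map_eq_none_iff, ih]
      constructor
      · rintro hall w' (rfl | hw')
        · exact Bool.eq_false_iff.mpr h
        · exact hall w' hw'
      · intro hall w' hw'
        exact hall w' (Or.inr hw')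

theorem bestW_cons (c : Char) (rest : List Char) :
    ∀ (ws : List (List Char)) (r : Int),
      bestW (c :: rest) ws r =
        match findWordA (c :: rest) ws with
        | some (i, _) => some (0, r + (i : Int), r + (i : Int))
        | none => shiftO (bestW rest ws r) := by
  intro ws
  induction ws with
  | nil => intro r; rfl
  | cons w ws ih =>
    intro r
    rw [bestW, candW_cons, ih (r + 1), findWordA]
    by_cases hs : PySem.Chars.startswith (c :: rest) w
    · rw [if_pos hs, if_pos hs]
      cases hf : findWordA (c :: rest) ws with
      | some p =>
        obtain ⟨i, w'⟩ := p
        show minOpt (some (0, r, r)) (some (0, r + 1 + (i : Int), r + 1 + (i : Int))) = some (0, r + 0, r + 0)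
        simp only [minOpt, minf, lexLt]
        rw [if_neg (by simp; omega)]
        norm_num
      | none =>
        cases hb : bestW rest ws (r + 1) with
        | none =>
          show minOpt (some (0, r, r)) none = some (0, r + 0, r + 0)
          simp [minOpt]
        | some b =>
          have hpos := bestW_pos rest ws (r + 1) b hb
          show minOpt (some (0, r, r)) (shiftO (some b)) = some (0, r + 0, r + 0)
          obtain ⟨b1, b2, b3⟩ := b
          simp only [shiftO, Option.map_some, minOpt, minf, lexLt]
          rw [if_neg (by simp at hpos ⊢; omega)]
          norm_num
    · rw [if_neg hs, if_neg hs]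
      cases hf : findWordA (c :: rest) ws with
      | some p =>
        obtain ⟨i, w'⟩ := p
        show minOpt (shiftO (candW rest w r)) (some (0, r + 1 + (i : Int), r + 1 + (i : Int))) =
          some (0, r + ((i : Int) + 1), r + ((i : Int) + 1))
        cases hc : candW rest w r with
        | none =>
          simp only [shiftO, Option.map_none, minOpt]
          norm_num
          omega
        | some x =>
          have hx := candW_pos rest w r x hc
          obtain ⟨x1, x2, x3⟩ := x
          simp only [shiftO, Option.map_some, minOpt, minf, lexLt]
          rw [if_pos (by simp at hx ⊢; omega)]
          norm_num
          omega
      | none =>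
        rw [minOpt_shift]
        rfl

-- A's scan, one position at a time, tracking whether a '0' was seen
def scanW (words : List (List Char)) : List Char → Bool → Option Int
  | [], z => if z then some 0 else none
  | c :: rest, z =>
    if PySem.Chars.isdigit c then
      if c = '0' then scanW words rest true else some ((c.toNat : Int) - 48)
    else
      match findWordA (c :: rest) words with
      | some (i, _) => some ((i : Int) + 1)
      | none => scanW words rest z

theorem loopA_truthy (ws : List (List Char)) (found : Option Int) (line : List Char)
    (h : truthyOpt found = true) : loopA ws found line = found := by
  cases line with
  | nil => rw [loopA]
  | cons c rest => rw [loopA, if_pos h]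

theorem loopA_eq_scanW (ws : List (List Char)) :
    ∀ (line : List Char) (found : Option Int),
      truthyOpt found = false → loopA ws found line = scanW ws line (found == some 0)
  | [], found, h => by
    rw [loopA]
    cases found with
    | none => simp [scanW]
    | some n =>
      have hn : n = 0 := by simpa [truthyOpt] using h
      subst hn; simp [scanW]
  | c :: rest, found, h => by
    rw [loopA, if_neg (by simp [h])]
    by_cases hd : PySem.Chars.isdigit c
    · rw [if_pos hd]
      by_cases h0 : c = '0'
      · subst h0
        rw [show ((('0').toNat : Int) - 48) = 0 from by decide,
          loopA_eq_scanW ws rest (some 0) rfl,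
          show ((some (0 : Int)) == some 0) = true from by decide]
        conv_rhs => rw [scanW]
        rw [if_pos (show PySem.Chars.isdigit '0' = true from by decide), if_pos rfl]
      · have hnz : truthyOpt (some ((c.toNat : Int) - 48)) = true := by
          have h1 := (chDigit c).mp hd
          have h2 : c.toNat ≠ 48 := fun hh => h0 ((chZero c).mpr hh)
          simp only [truthyOpt, bne_iff_ne, ne_eq]
          omega
        rw [loopA_truthy ws _ _ hnz]
        simp [scanW, hd, h0]
    · rw [if_neg hd]
      cases hw : findWordA (c :: rest) ws with
      | some p =>
        obtain ⟨i, w⟩ := p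
        have hv : truthyOpt (some ((i : Int) + 1)) = true := by
          simp only [truthyOpt, bne_iff_ne, ne_eq]; omega
        show loopA ws (some ((i : Int) + 1)) ((c :: rest).drop w.length) = _
        rw [loopA_truthy ws _ _ hv]
        conv_rhs => rw [scanW]
        rw [if_neg hd, hw]
      | none =>
        rw [loopA_eq_scanW ws rest found h]
        simp [scanW, hd, hw]

theorem scanW_noHit (ws : List (List Char)) :
    ∀ l : List Char, (∀ q, pvHit ws (l.drop q) = false) → scanW ws l true = some 0 := by
  intro l
  induction l with
  | nil => intro _; rfl
  | cons c rest ih =>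
    intro h
    have h0 := h 0
    simp only [List.drop_zero, pvHit] at h0
    by_cases hd : PySem.Chars.isdigit c
    · rw [hd, if_pos rfl] at h0
      have hc : c = '0' := by simpa using h0
      rw [scanW, if_pos hd, if_pos hc]
      exact ih (fun q => by simpa using h (q + 1))
    · rw [if_neg hd] at h0
      rw [scanW, if_neg hd,
        (findWordA_none_iff (c :: rest) ws).mpr (by
          intro w hw
          exact Bool.eq_false_iff.mpr (fun ht => by
            rw [List.any_eq_false] at h0
            exact absurd ht (by simpa using h0 w hw)))]
      exact ih (fun q => by simpa using h (q + 1))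

theorem scanW_hit (ws : List (List Char)) :
    ∀ (l : List Char) (z : Bool), (∃ q, pvHit ws (l.drop q) = true) →
      ∃ v, scanW ws l z = some v ∧ v ≠ 0 := by
  intro l
  induction l with
  | nil =>
    intro z ⟨q, hq⟩
    simp [pvHit, List.drop_nil] at hq
  | cons c rest ih =>
    intro z ⟨q, hq⟩
    by_cases hd : PySem.Chars.isdigit c
    · by_cases h0 : c = '0'
      · have hq' : ∃ q', pvHit ws (rest.drop q') = true := by
          cases q with
          | zero =>
            exfalso
            rw [List.drop_zero, h0] at hq
            simp [pvHit, show PySem.Chars.isdigit '0' = true from by decide] at hq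
          | succ q' => exact ⟨q', by simpa using hq⟩
        obtain ⟨v, hv, hvne⟩ := ih true hq'
        exact ⟨v, by rw [scanW, if_pos hd, if_pos h0]; exact hv, hvne⟩
      · refine ⟨(c.toNat : Int) - 48, by rw [scanW, if_pos hd, if_neg h0], ?_⟩
        have h1 := (chDigit c).mp hd
        have h2 : c.toNat ≠ 48 := fun hh => h0 ((chZero c).mpr hh)
        omega
    · cases hw : findWordA (c :: rest) ws with
      | some p =>
        obtain ⟨i, w⟩ := p
        refine ⟨(i : Int) + 1, by rw [scanW, if_neg hd, hw], by omega⟩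
      | none =>
        have hq' : ∃ q', pvHit ws (rest.drop q') = true := by
          cases q with
          | zero =>
            exfalso
            simp only [List.drop_zero, pvHit, if_neg hd] at hq
            rw [List.any_eq_true] at hq
            obtain ⟨w, hw1, hw2⟩ := hq
            rw [findWordA_none_iff] at hw
            exact absurd (by simpa using hw2) (by simp [hw w hw1])
          | succ q' => exact ⟨q', by simpa using hq⟩
        obtain ⟨v, hv, hvne⟩ := ih z hq'
        exact ⟨v, by rw [scanW, if_neg hd, hw]; exact hv, hvne⟩

-- abbreviation used in the proofs below
def DL (ws : List (List Char)) (l : List Char) : Prop :=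
  ∃ p ∈ List.range l.length,
    (l.drop p).head? = some '0' ∧
    (∀ q ∈ List.range p, pvFree ws (l.drop q) = true) ∧
    ∃ q ∈ List.range l.length, p < q ∧ pvHit ws (l.drop q) = true

theorem D_iff_DL (line : String) (words : List String) :
    D_extract_digit line words ↔ DL (words.map String.toList) line.toList := by
  unfold D_extract_digit DL
  have hlen : ∀ n, n < line.toList.length → line.toList.drop n ≠ [] := by
    intro n hn h
    rw [List.drop_eq_nil_iff] at h
    omega
  constructor
  · rintro ⟨p, hp, q, hq, hpq, hz, hfr, hc, hne⟩
    refine ⟨p, List.mem_range.mpr hp, hz, ?_, q, List.mem_range.mpr hq, hpq, ?_⟩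
    · intro r hr
      rw [List.mem_range] at hr
      have hnn : r < line.toList.length := by omega
      obtain ⟨c, s, hcs⟩ := List.exists_cons_of_ne_nil (hlen r (by omega))
      rw [hcs]
      exact (cand_free words c s).mp (by rw [← hcs]; exact hfr r hr)
    · obtain ⟨c, s, hcs⟩ := List.exists_cons_of_ne_nil (hlen q (by omega))
      rw [hcs]
      exact (cand_hit words c s).mp (by rw [← hcs]; exact ⟨hc, hne⟩)
  · rintro ⟨p, hp, hz, hfr, q, hq, hpq, hh⟩
    rw [List.mem_range] at hp hq
    obtain ⟨c, s, hcs⟩ := List.exists_cons_of_ne_nil (hlen q (by omega))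
    have hch := (cand_hit words c s).mpr (by rw [← hcs]; exact hh)
    refine ⟨p, hp, q, hq, hpq, hz, ?_, by rw [hcs]; exact hch.1, by rw [hcs]; exact hch.2⟩
    intro r hr
    obtain ⟨d, t, hdt⟩ := List.exists_cons_of_ne_nil (hlen r (by omega))
    rw [hdt]
    exact (cand_free words d t).mpr (by rw [← hdt]; exact hfr r (List.mem_range.mpr hr))

theorem bestW_nil (ws : List (List Char)) (hnil : [] ∉ ws) :
    ∀ r : Int, bestW [] ws r = none := by
  induction ws with
  | nil => intro r; rfl
  | cons w ws ih =>
    intro r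
    rw [bestW, ih (fun h => hnil (List.mem_cons_of_mem _ h)) (r + 1)]
    have hw : w ≠ [] := fun h => hnil (h ▸ List.mem_cons_self)
    have : PySem.Chars.find [] w = -1 := by
      rw [PySem.Chars.find_eq_neg_one_iff]
      intro hinf
      exact hw (List.eq_nil_of_infix_nil hinf)
    simp [candW, this, minOpt]

theorem main_eq (ws : List (List Char)) :
    ∀ l : List Char, ([] ∈ ws → l ≠ []) → ¬ DL ws l →
      scanW ws l false = (minOpt (digitCandB l 0) (bestW l ws 1)).map (·.2.2) := by
  intro l
  induction l with
  | nil =>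
    intro hnil _
    have h2 : [] ∉ ws := fun h => (hnil h) rfl
    rw [bestW_nil ws h2 1]
    rfl
  | cons c rest ih =>
    intro hnil hD
    have hdc : digitCandB (c :: rest) 0 =
        if PySem.Chars.isdigit c then some (0, 0, (c.toNat : Int) - 48)
        else shiftO (digitCandB rest 0) := by
      by_cases h : PySem.Chars.isdigit c
      · simp [digitCandB, h]
      · simp only [digitCandB, h, Bool.false_eq_true, if_false]
        exact digitCandB_shift rest 0
    by_cases hd : PySem.Chars.isdigit c
    · -- digit head: both sides produce the digit (or, for '0', A exhausts with 0)
      rw [hdc, if_pos hd]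
      have hleft : ∀ o, bestW (c :: rest) ws 1 = o →
          minOpt (some (0, 0, (c.toNat : Int) - 48)) (bestW (c :: rest) ws 1) =
            some (0, 0, (c.toNat : Int) - 48) := by
        intro o ho
        rw [bestW_cons]
        cases hf : findWordA (c :: rest) ws with
        | some p =>
          obtain ⟨i, w⟩ := p
          simp only [minOpt, minf, lexLt]
          rw [if_neg (by simp; omega)]
        | none =>
          cases hb : bestW rest ws 1 with
          | none => rfl
          | some b =>
            have hpos := bestW_pos rest ws 1 b hb
            obtain ⟨b1, b2, b3⟩ := b
            simp only [shiftO, Option.map_some, minOpt, minf, lexLt]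
            rw [if_neg (by simp at hpos ⊢; omega)]
      rw [hleft _ rfl]
      by_cases h0 : c = '0'
      · subst h0
        rw [scanW, if_pos hd, if_pos rfl]
        have hnh : ∀ q, pvHit ws (rest.drop q) = false := by
          intro q
          by_contra hq
          rw [Bool.not_eq_false] at hq
          have hqlen : q < rest.length := by
            by_contra hge
            rw [List.drop_eq_nil_of_le (by omega)] at hq
            simp [pvHit] at hq
          exact hD ⟨0, by simp, by simp, by simp,
            ⟨q + 1, by simp; omega, by omega, by simpa using hq⟩⟩
        rw [scanW_noHit ws rest hnh]
        simp
      · rw [scanW, if_pos hd, if_neg h0]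
        rfl
    · -- non-digit head
      rw [hdc, if_neg hd, scanW, if_neg hd]
      cases hf : findWordA (c :: rest) ws with
      | some p =>
        obtain ⟨i, w⟩ := p
        rw [bestW_cons, hf]
        cases hdr : digitCandB rest 0 with
        | none =>
          simp only [shiftO, Option.map_none, minOpt, Option.map_some]
          norm_num
          omega
        | some x =>
          have hx := digitCandB_pos rest 0 x hdr
          obtain ⟨x1, x2, x3⟩ := x
          simp only [shiftO, Option.map_some, minOpt, minf, lexLt]
          rw [if_pos (by simp at hx ⊢; omega)]
          simp only [Option.map_some]
          norm_num
          omega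
      | none =>
        have hws : ∀ w ∈ ws, PySem.Chars.startswith (c :: rest) w = false :=
          (findWordA_none_iff (c :: rest) ws).mp hf
        have hnilr : [] ∈ ws → rest ≠ [] := by
          intro h
          exfalso
          have := hws [] h
          rw [show PySem.Chars.startswith (c :: rest) [] = true from by
            rw [PySem.Chars.startswith_iff]; exact List.nil_prefix] at this
          exact absurd this (by simp)
        have hfree : pvFree ws (c :: rest) = true := by
          simp only [pvFree, hd, Bool.not_false, Bool.true_and, Bool.not_eq_true']
          rw [List.any_eq_false]
          intro w hw
          simpa using hws w hw
        have hDr : ¬ DL ws rest := by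
          intro ⟨p, hp, hz, hfr, q, hq, hpq, hh⟩
          refine hD ⟨p + 1, by simp at hp ⊢; omega, by simpa using hz, ?_,
            ⟨q + 1, by simp at hq ⊢; omega, by omega, by simpa using hh⟩⟩
          intro q' hq'
          rw [List.mem_range] at hq'
          cases q' with
          | zero => simpa using hfree
          | succ q'' =>
            rw [List.drop_succ_cons]
            exact hfr q'' (by rw [List.mem_range]; omega)
        rw [ih hnilr hDr, bestW_cons, hf, minOpt_shift]
        cases minOpt (digitCandB rest 0) (bestW rest ws 1) <;> simp [shiftO]

-- bridge from the port's candidate list to the structured min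
theorem match_omin (xs : List (Int × Int × Int)) :
    (match xs with
      | [] => (none : Option Int)
      | c :: cs => some ((cs.foldl minf c).2.2)) = (omin xs).map (·.2.2) := by
  cases xs <;> rfl

theorem alt_eq_minOpt (line : String) (words : List String) :
    extract_digit_alt line words =
      (minOpt (digitCandB line.toList 0)
        (bestW line.toList (words.map String.toList) 1)).map (·.2.2) := by
  show (match (match digitCandB line.toList 0 with | some c => [c] | none => []) ++
      wordCandsB line.toList (words.map String.toList) 1 with
    | [] => (none : Option Int)
    | c :: cs => some ((cs.foldl minf c).2.2)) = _
  rw [match_omin, omin_append, omin_wordCandsB]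
  have hfirst : omin (match digitCandB line.toList 0 with | some c => [c] | none => []) =
      digitCandB line.toList 0 := by
    cases digitCandB line.toList 0 <;> rfl
  rw [hfirst]

theorem toList_nil_iff (s : String) : s.toList = [] ↔ s = "" := by
  constructor
  · intro h
    have h2 : s.toList = ("" : String).toList := h
    exact String.toList_inj.mp h2
  · intro h; rw [h]; rfl

-- first digit of the line is the '0' at position p
theorem digitCandB_first (ws : List (List Char)) :
    ∀ (l : List Char) (p : Nat) (i : Int),
      (∀ q, q < p → pvFree ws (l.drop q) = true) →
      (l.drop p).head? = some '0' →
      digitCandB l i = some (i + (p : Int), 0, 0) := by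
  intro l
  induction l with
  | nil =>
    intro p i _ hz
    simp at hz
  | cons c rest ih =>
    intro p i hfr hz
    cases p with
    | zero =>
      simp only [List.drop_zero, List.head?_cons, Option.some_inj] at hz
      subst hz
      simp [digitCandB, show PySem.Chars.isdigit '0' = true from by decide]
    | succ p' =>
      have h0 := hfr 0 (by omega)
      simp only [List.drop_zero, pvFree, Bool.and_eq_true, Bool.not_eq_true'] at h0
      rw [digitCandB, if_neg (by simp [h0.1]),
        ih p' (i + 1) (fun q hq => by simpa using hfr (q + 1) (by omega)) (by simpa using hz)]
      congr 2
      push_cast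
      ring

-- no word occurs before position p
theorem candW_ge (l w : List Char) (r : Int) (p : Nat) (b : Int × Int × Int)
    (hq : ∀ q, q < p → PySem.Chars.startswith (l.drop q) w = false)
    (h : candW l w r = some b) : (p : Int) ≤ b.1 := by
  have hge0 := PySem.Chars.neg_one_le_find l w
  unfold candW at h
  split_ifs at h with h1
  injection h with h2
  rw [← h2]
  show (p : Int) ≤ PySem.Chars.find l w
  have hge : 0 ≤ PySem.Chars.find l w := by omega
  obtain ⟨hpre, _⟩ := PySem.Chars.find_spec hge
  by_contra hlt
  have hlt' : (PySem.Chars.find l w).toNat < p := by omega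
  have hf := hq _ hlt'
  rw [Bool.eq_false_iff] at hf
  exact hf ((PySem.Chars.startswith_iff _ _).mpr hpre)

theorem bestW_ge (l : List Char) (p : Nat) :
    ∀ (ws : List (List Char)) (r : Int) (b : Int × Int × Int),
      (∀ w ∈ ws, ∀ q, q < p → PySem.Chars.startswith (l.drop q) w = false) →
      bestW l ws r = some b → (p : Int) ≤ b.1 := by
  intro ws
  induction ws with
  | nil => intro r b _ h; simp [bestW] at h
  | cons w ws ih =>
    intro r b hq h
    simp only [bestW] at h
    cases hc : candW l w r with
    | none =>
      rw [hc] at h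
      exact ih (r + 1) b (fun w' hw' => hq w' (List.mem_cons_of_mem _ hw')) h
    | some x =>
      have hx := candW_ge l w r p x (hq w List.mem_cons_self) hc
      rw [hc] at h
      cases hb : bestW l ws (r + 1) with
      | none =>
        rw [hb] at h
        simp only [minOpt] at h
        injection h with h'
        rw [← h']; exact hx
      | some y =>
        have hy := ih (r + 1) y (fun w' hw' => hq w' (List.mem_cons_of_mem _ hw')) hb
        rw [hb] at h
        simp only [minOpt, minf] at h
        split_ifs at h <;> (injection h with h'; rw [← h']) <;> assumption

-- ===== VERDICT (by name: the statement is the Claim_ definition above) =====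
theorem extract_digit_spec : Claim_unchanged_extract_digit := by
  intro line words _ hPre hND
  rw [alt_eq_minOpt]
  unfold extract_digit
  rw [loopA_eq_scanW _ _ none rfl]
  rw [show ((none : Option Int) == some 0) = false from rfl]
  apply main_eq
  · intro h hl
    apply hPre
    refine ⟨(toList_nil_iff line).mp hl, ?_⟩
    obtain ⟨w, hw, hw2⟩ := List.mem_map.mp h
    rwa [show w = "" from (toList_nil_iff w).mp hw2] at hw
  · intro hDL
    exact hND ((D_iff_DL line words).mpr hDL)

theorem witnessA_val : extract_digit "01" [] = some 1 := by
  show loopA [] none "01".toList = some 1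
  rw [show "01".toList = ['0', '1'] from by decide]
  rw [loopA, if_neg (by decide), if_pos (by decide)]
  rw [show ((('0').toNat : Int) - 48) = 0 from by decide]
  rw [loopA, if_neg (by decide), if_pos (by decide)]
  rw [show ((('1').toNat : Int) - 48) = 1 from by decide]
  rw [loopA]

theorem extract_digit_changed : Claim_changed_extract_digit := by
  unfold Claim_changed_extract_digit
  refine ⟨by decide, by decide, by decide, witnessA_val, by decide, by decide⟩

theorem extract_digit_tight : Claim_exact_extract_digit := by
  intro line words _ _ hD hEq
  obtain ⟨p, hp, hz, hfr, q, hq, hpq, hh⟩ := (D_iff_DL line words).mp hD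
  rw [List.mem_range] at hp
  -- A returns a nonzero value
  obtain ⟨v, hv, hvne⟩ := scanW_hit (words.map String.toList) line.toList false ⟨q, hh⟩
  have hA : extract_digit line words = some v := by
    unfold extract_digit
    rw [loopA_eq_scanW _ _ none rfl,
      show ((none : Option Int) == some 0) = false from rfl, hv]
  -- B returns 0
  have hfr' : ∀ q', q' < p → pvFree (words.map String.toList) (line.toList.drop q') = true :=
    fun q' hq' => hfr q' (List.mem_range.mpr hq')
  have hdc : digitCandB line.toList 0 = some ((0 : Int) + (p : Int), 0, 0) :=
    digitCandB_first (words.map String.toList) line.toList p 0 hfr' hz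
  have hsw : ∀ w ∈ words.map String.toList, ∀ q', q' < p →
      PySem.Chars.startswith (line.toList.drop q') w = false := by
    intro w hw q' hq'
    have hfq := hfr' q' hq'
    cases hdrop : line.toList.drop q' with
    | nil =>
      exfalso
      rw [List.drop_eq_nil_iff] at hdrop
      omega
    | cons d ds =>
      rw [hdrop] at hfq
      simp only [pvFree, Bool.and_eq_true, Bool.not_eq_true'] at hfq
      rw [List.any_eq_false] at hfq
      simpa using hfq.2 w hw
  have hB : extract_digit_alt line words = some 0 := by
    rw [alt_eq_minOpt, hdc]
    cases hb : bestW line.toList (words.map String.toList) 1 with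
    | none => rfl
    | some b =>
      have hb1 := bestW_ge line.toList p _ 1 b hsw hb
      have hb2 := bestW_pos line.toList _ 1 b hb
      simp only [minOpt, minf, lexLt]
      rw [if_neg (by simp; omega)]
      rfl
  rw [hA, hB] at hEq
  exact hvne (Option.some_inj.mp hEq)
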